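-- pv_equiv track=rewrite | github.com/rmoser/Python_Learning | 6001x/finalexam/lib.py | uniqueValues2
-- ===== SOURCE A (Python) =====
-- def uniqueValues2(aDict):
--     '''
--     aDict: a dictionary
--     returns: a sorted list of keys that map to unique aDict values, empty list if none
--     '''
--
--
--     workDict = dict()
--     for k in aDict:
--         v = aDict[k]
--         if v not in workDict:
--             workDict[v] = [k]
--         else:
--             workDict[v].append(k)
--
--     return sorted([v[0] for k, v in workDict.items() if len(v) == 1])
-- ===== SOURCE B (Python) =====
-- def uniqueValues2(aDict):
--     # sort-then-scan: order the (key, value) pairs by value, walk the runs of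
--     # equal values, keep the key of each run of length 1, then sort the keys
--     pairs = sorted(aDict.items(), key=lambda p: p[1])
--     result = []
--     i = 0
--     while i < len(pairs):
--         j = i + 1
--         while j < len(pairs) and pairs[j][1] == pairs[i][1]:
--             j += 1
--         if j == i + 1:
--             result.append(pairs[i][0])
--         i = j
--     return sorted(result)
-- ===== Notes on version B (the rewrite author's own statement) =====
-- stated objective: alternative
-- what changed: B replaces A's value-to-key-bucket grouping dict (and the filter over its items) by a sort-then-scan: sort the (key,value) pairs by value, walk adjacent runs of equal values keeping the key of each singleton run, then sort those keys.
import Mathlib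
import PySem

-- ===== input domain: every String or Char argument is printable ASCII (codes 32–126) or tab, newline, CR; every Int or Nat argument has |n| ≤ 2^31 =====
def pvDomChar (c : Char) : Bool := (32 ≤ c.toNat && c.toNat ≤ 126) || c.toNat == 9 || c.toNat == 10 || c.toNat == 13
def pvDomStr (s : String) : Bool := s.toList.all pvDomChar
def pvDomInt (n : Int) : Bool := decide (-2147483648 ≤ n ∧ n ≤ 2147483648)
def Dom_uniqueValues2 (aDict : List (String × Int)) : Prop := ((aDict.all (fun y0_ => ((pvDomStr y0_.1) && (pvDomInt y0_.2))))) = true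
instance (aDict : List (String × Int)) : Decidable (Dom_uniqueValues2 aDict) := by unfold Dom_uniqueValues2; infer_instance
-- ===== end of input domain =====

-- B replaces A's value→keys grouping dict by sort-then-scan: sort the pairs by value,
-- walk adjacent runs of equal values keeping the key of each singleton run, sort the keys.

-- ===== PORT A =====
-- 'for k in aDict: v = aDict[k]' iterates the dict's key/value pairs in insertion order;
-- the association list IS that dict, so the loop folds over its pairs (k, v) directly.
def uniqueValues2 (aDict : List (String × Int)) : List String :=
  let workDict : PySem.Dict Int (List String) :=
    aDict.foldl
      (fun w p =>
        if w.contains p.2 then w.insert p.2 (w.getD p.2 [] ++ [p.1])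
        else w.insert p.2 [p.1])
      PySem.Dict.empty
  PySem.List.sorted
    ((workDict.items.filter (fun q => q.2.length == 1)).map
        (fun q => PySem.List.pyGetD q.2 0 ""))   -- v[0]; the filter guarantees index 0 is in range
    (fun x => x) false

-- ===== PORT B =====
-- the outer while loop of Source B: each step consumes one run of equal values
-- (the inner 'while j < len(pairs) and pairs[j][1] == pairs[i][1]' is the
-- takeWhile/dropWhile split of the tail) and keeps the key of a singleton run
def pvScanRuns : List (String × Int) → List String
  | [] => []
  | (k, v) :: t =>
      if (t.takeWhile (fun p => p.2 == v)).isEmpty then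
        k :: pvScanRuns (t.dropWhile (fun p => p.2 == v))
      else
        pvScanRuns (t.dropWhile (fun p => p.2 == v))
termination_by l => l.length
decreasing_by all_goals exact Nat.lt_succ_of_le (List.length_dropWhile_le _ _)

def uniqueValues2_alt (aDict : List (String × Int)) : List String :=
  let pairs := PySem.List.sorted aDict (fun p => p.2) false
  PySem.List.sorted (pvScanRuns pairs) (fun x => x) false

-- ===== PRECONDITION & SPEC =====
def Spec_uniqueValues2 (aDict : List (String × Int)) (out : List String) : Prop := out = uniqueValues2_alt aDict
instance (aDict : List (String × Int)) (out : List String) : Decidable (Spec_uniqueValues2 aDict out) := by unfold Spec_uniqueValues2; infer_instance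

-- ===== CLAIM (what is proved, stated in full; the proofs are below) =====
def Claim_equal_uniqueValues2 : Prop := ∀ (aDict : List (String × Int)), Dom_uniqueValues2 aDict → Spec_uniqueValues2 aDict (uniqueValues2 aDict)

-- ===== LEMMAS AND PROOFS =====

-- A's grouping loop body is exactly the 'modify … (· ++ [k])' accumulator step.
theorem hfun_modify : ∀ (w : PySem.Dict Int (List String)) (p : String × Int),
    (if w.contains p.2 then w.insert p.2 (w.getD p.2 [] ++ [p.1]) else w.insert p.2 [p.1])
      = w.modify p.2 [] (fun ys => ys ++ [p.1]) := by
  intro w p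
  by_cases hc : w.contains p.2
  · simp [hc]; rfl
  · simp only [Bool.not_eq_true] at hc
    rw [show w.modify p.2 [] (fun ys => ys ++ [p.1]) = w.insert p.2 (w.getD p.2 [] ++ [p.1]) from rfl,
      PySem.Dict.getD_of_not_contains _ _ hc]
    simp [hc]

-- the bucket of value v is the keys paired with v, in order
theorem getD_group (aDict : List (String × Int)) (v : Int) :
    (aDict.foldl (fun (d : PySem.Dict Int (List String)) p => d.modify p.2 [] (fun ys => ys ++ [p.1])) PySem.Dict.empty).getD v []
    = (aDict.filter (fun p => p.2 == v)).map (·.1) := by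
  rw [show (aDict.foldl (fun (d : PySem.Dict Int (List String)) p => d.modify p.2 [] (fun ys => ys ++ [p.1])) PySem.Dict.empty)
      = ((aDict.map Prod.swap).foldl (fun (d : PySem.Dict Int (List String)) q => d.modify q.1 [] (fun ys => ys ++ [q.2])) PySem.Dict.empty) from by
    rw [List.foldl_map]; simp]
  rw [PySem.Dict.getD_foldl_modify_append]
  rw [List.filter_map]
  simp [Function.comp_def, PySem.Dict.getD_empty]

-- bucket length = multiplicity of the value
theorem grp_len (aDict : List (String × Int)) (v : Int) :
    ((aDict.filter (fun p => p.2 == v)).map (·.1)).length = (aDict.map (·.2)).count v := by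
  simp only [List.length_map, List.count]
  rw [List.countP_map, List.countP_eq_length_filter]
  simp [Function.comp_def]

-- a value of multiplicity 1 has the singleton bucket of its own key
theorem grp_singleton (aDict : List (String × Int)) (p : String × Int) (hp : p ∈ aDict)
    (hc : (aDict.map (·.2)).count p.2 = 1) :
    PySem.List.pyGetD ((aDict.filter (fun r => r.2 == p.2)).map (·.1)) 0 "" = p.1 := by
  have hlen : ((aDict.filter (fun r => r.2 == p.2)).map (·.1)).length = 1 := by
    rw [grp_len]; exact hc
  rw [List.length_map] at hlen
  obtain ⟨a, ha⟩ := List.length_eq_one_iff.1 hlen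
  have hpa : p ∈ aDict.filter (fun r => r.2 == p.2) := by simp [List.mem_filter, hp]
  rw [ha] at hpa ⊢
  simp at hpa
  subst hpa
  simp [PySem.List.pyGetD_of_nonneg]

theorem count_le_tail {α : Type} [DecidableEq α] (x : α) (t : List α) (q : α → Bool)
    (h : ∀ v, q v = true → (x :: t).count v ≤ 1) : ∀ v, q v = true → t.count v ≤ 1 := by
  intro v hv
  have h1 := h v hv
  have : t.count v ≤ (x :: t).count v := by by_cases hvx : v = x <;> simp [List.count_cons, hvx]
  omega

-- filtering set(xs) through a predicate true only on count-1 elements = filtering xs itself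
theorem filter_ofList_of_count_le_one {α : Type} [DecidableEq α] (xs : List α) (q : α → Bool)
    (h : ∀ v, q v = true → xs.count v ≤ 1) :
    (PySem.Set.ofList xs).filter q = xs.filter q := by
  induction xs with
  | nil => rfl
  | cons x t ih =>
    have hdis : PySem.Set.discard (PySem.Set.ofList t) x
        = (PySem.Set.ofList t).filter (fun y => !(y == x)) := rfl
    rw [PySem.Set.ofList_cons, hdis]
    have ht := count_le_tail x t q h
    by_cases hq : q x = true
    · have hx : x ∉ t := by
        have h1 := h x hq
        rw [List.count_cons_self] at h1
        have : t.count x = 0 := by omega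
        simpa [List.count_eq_zero] using this
      simp only [List.filter_cons, hq, List.filter_filter]
      rw [show (PySem.Set.ofList t).filter (fun a => q a && !(a == x))
            = (PySem.Set.ofList t).filter q from
          List.filter_congr (by
            intro y hy
            have hyt : y ∈ t := (PySem.Set.mem_ofList t y).1 hy
            have hyx : y ≠ x := fun e => hx (e ▸ hyt)
            simp [hyx]),
        ih ht]
    · simp only [List.filter_cons, hq, List.filter_filter]
      rw [show (PySem.Set.ofList t).filter (fun a => q a && !(a == x))
            = (PySem.Set.ofList t).filter q from
          List.filter_congr (by
            intro y _
            by_cases hqy : q y = true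
            · have hyx : y ≠ x := fun e => by rw [e] at hqy; exact hq hqy
              simp [hyx, hqy]
            · simp [Bool.not_eq_true] at hqy
              simp [hqy]),
        ih ht]

-- A's unsorted comprehension is the keys of count-1 values, in insertion order
theorem A_pre_sort (aDict : List (String × Int)) :
    (((aDict.foldl
        (fun (w : PySem.Dict Int (List String)) p =>
          if w.contains p.2 then w.insert p.2 (w.getD p.2 [] ++ [p.1])
          else w.insert p.2 [p.1])
        PySem.Dict.empty).items.filter (fun q => q.2.length == 1)).map
        (fun q => PySem.List.pyGetD q.2 0 ""))
    = (aDict.filter (fun p => (aDict.map (·.2)).count p.2 == 1)).map (·.1) := by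
  simp only [hfun_modify]
  have hnd : (aDict.foldl (fun (d : PySem.Dict Int (List String)) p => d.modify p.2 [] (fun ys => ys ++ [p.1])) PySem.Dict.empty).keys.Nodup :=
    PySem.Dict.nodup_keys_foldl_modify_key _ _ _ _ _ PySem.Dict.nodup_keys_empty
  rw [PySem.Dict.items_eq_map_keys _ hnd []]
  rw [PySem.Dict.keys_foldl_modify_key]
  simp only [getD_group, PySem.Dict.keys_empty, PySem.Set.update_nil_left]
  rw [List.filter_map, List.map_map]
  simp only [Function.comp_def, grp_len]
  rw [filter_ofList_of_count_le_one _ _ (by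
    intro v hv
    simp only [beq_iff_eq] at hv
    exact le_of_eq hv)]
  rw [List.filter_map, List.map_map]
  apply List.map_congr_left
  intro p hp
  rw [List.mem_filter] at hp
  simp only [Function.comp_def]
  exact grp_singleton aDict p hp.1 (by simpa using hp.2)

-- in a value-sorted list every element past the dropped run has value strictly above v
theorem dropWhile_gt (v : Int) : ∀ (t : List (String × Int)),
    t.Pairwise (fun a b => a.2 ≤ b.2) → (∀ p ∈ t, v ≤ p.2) →
    ∀ p ∈ t.dropWhile (fun p => p.2 == v), v < p.2 := by
  intro t
  induction t with
  | nil => intro _ _ p hp; simp [List.dropWhile] at hp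
  | cons x r ih =>
    intro hpw hle p hp
    rcases List.pairwise_cons.1 hpw with ⟨hxr, hr⟩
    by_cases hx : x.2 = v
    · rw [List.dropWhile_cons_of_pos (by simp [hx])] at hp
      exact ih hr (fun q hq => hle q (List.mem_cons_of_mem _ hq)) p hp
    · rw [List.dropWhile_cons_of_neg (by simp [hx])] at hp
      have hvx : v < x.2 := lt_of_le_of_ne (hle x (List.mem_cons_self)) (Ne.symm hx)
      rcases List.mem_cons.1 hp with h | h
      · exact h ▸ hvx
      · exact lt_of_lt_of_le hvx (hxr p h)

-- the run scan over a value-sorted list collects exactly the keys of count-1 values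
theorem scan_eq_filter : ∀ (l : List (String × Int)), l.Pairwise (fun a b => a.2 ≤ b.2) →
    pvScanRuns l = (l.filter (fun p => (l.map (·.2)).count p.2 == 1)).map (·.1) := by
  intro l
  induction l using pvScanRuns.induct with
  | case1 => intro _; simp [pvScanRuns]
  | case2 k v t hrun ih =>
    intro hpw
    rcases List.pairwise_cons.1 hpw with ⟨hhd, ht⟩
    have hdecomp : t = t.takeWhile (fun p => p.2 == v) ++ t.dropWhile (fun p => p.2 == v) :=
      (List.takeWhile_append_dropWhile).symm
    have hrest_pw : (t.dropWhile (fun p => p.2 == v)).Pairwise (fun a b => a.2 ≤ b.2) :=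
      ht.sublist (List.dropWhile_sublist _)
    have hrest_gt : ∀ p ∈ t.dropWhile (fun p => p.2 == v), v < p.2 :=
      dropWhile_gt v t ht hhd
    have hrun_v : ∀ p ∈ t.takeWhile (fun p => p.2 == v), p.2 = v := by
      intro p hp
      have := List.mem_takeWhile_imp hp
      simpa using this
    have hcv : (((k, v) :: t).map (·.2)).count v
        = 1 + (t.takeWhile (fun p => p.2 == v)).length := by
      rw [hdecomp]
      simp only [List.map_cons, List.map_append, List.count_cons, List.count_append]
      have h1 : ((t.takeWhile (fun p => p.2 == v)).map (·.2)).count v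
          = (t.takeWhile (fun p => p.2 == v)).length := by
        rw [List.count_eq_length.2 (by intro b hb; rcases List.mem_map.1 hb with ⟨q, hq, rfl⟩
                                       exact ((hrun_v q hq) ▸ rfl)), List.length_map]
      have h2 : ((t.dropWhile (fun p => p.2 == v)).map (·.2)).count v = 0 := by
        rw [List.count_eq_zero]
        intro hv
        rcases List.mem_map.1 hv with ⟨q, hq, hq2⟩
        exact absurd hq2 (ne_of_gt (hrest_gt q hq))
      rw [h1, h2]; simp; omega
    have hcrest : ∀ p ∈ t.dropWhile (fun p => p.2 == v),
        (((k, v) :: t).map (·.2)).count p.2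
          = ((t.dropWhile (fun p => p.2 == v)).map (·.2)).count p.2 := by
      intro p hp
      have hne : p.2 ≠ v := ne_of_gt (hrest_gt p hp)
      rw [hdecomp]
      simp only [List.map_cons, List.map_append, List.count_cons, List.count_append]
      have h1 : ((t.takeWhile (fun p => p.2 == v)).map (·.2)).count p.2 = 0 := by
        rw [List.count_eq_zero]
        intro hv
        rcases List.mem_map.1 hv with ⟨q, hq, hq2⟩
        exact hne (hq2 ▸ (hrun_v q hq))
      rw [h1]; simp [Ne.symm hne]
    have hfrun : ∀ q ∈ t.takeWhile (fun p => p.2 == v),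
        ((((k, v) :: t).map (·.2)).count q.2 == 1) = false := by
      intro q hq
      rw [hrun_v q hq, hcv]
      have hlen0 : (t.takeWhile (fun p => p.2 == v)).length ≠ 0 :=
        fun h0 => by rw [List.length_eq_zero_iff.1 h0] at hq; simp at hq
      simp only [beq_eq_false_iff_ne, ne_eq]
      omega
    -- abstract the filtering predicate so the list split below leaves it untouched
    obtain ⟨P, hP⟩ : ∃ P, P = (fun p : String × Int => ((((k, v) :: t).map (·.2)).count p.2 == 1)) :=
      ⟨_, rfl⟩
    have hfilter_run : (t.takeWhile (fun p => p.2 == v)).filter P = [] :=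
      List.filter_eq_nil_iff.2 (by
        intro q hq
        rw [hP]
        simp only [hfrun q hq]
        simp)
    have hfilter_rest : (t.dropWhile (fun p => p.2 == v)).filter P
        = (t.dropWhile (fun p => p.2 == v)).filter
            (fun p => ((t.dropWhile (fun p => p.2 == v)).map (·.2)).count p.2 == 1) := by
      rw [hP]
      exact List.filter_congr (by intro p hp; rw [hcrest p hp])
    conv_rhs =>
      rw [← hP,
        show ((k, v) :: t) = ((k, v) :: t.takeWhile (fun p => p.2 == v)) ++ t.dropWhile (fun p => p.2 == v) from by
          rw [List.cons_append, ← hdecomp]]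
    rw [List.filter_append, List.filter_cons, hfilter_run, hfilter_rest]
    have hrunP : P (k, v) = true := by
      rw [hP]
      show ((((k, v) :: t).map (·.2)).count (k, v).2 == 1) = true
      rw [show ((k, v) : String × Int).2 = v from rfl, hcv, List.isEmpty_iff.1 hrun]
      simp
    rw [hrunP]
    rw [show pvScanRuns ((k, v) :: t)
          = k :: pvScanRuns (t.dropWhile (fun p => p.2 == v)) from by
        rw [pvScanRuns]; rw [if_pos hrun], ih hrest_pw]
    simp
  | case3 k v t hrun ih =>
    intro hpw
    rcases List.pairwise_cons.1 hpw with ⟨hhd, ht⟩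
    have hdecomp : t = t.takeWhile (fun p => p.2 == v) ++ t.dropWhile (fun p => p.2 == v) :=
      (List.takeWhile_append_dropWhile).symm
    have hrest_pw : (t.dropWhile (fun p => p.2 == v)).Pairwise (fun a b => a.2 ≤ b.2) :=
      ht.sublist (List.dropWhile_sublist _)
    have hrest_gt : ∀ p ∈ t.dropWhile (fun p => p.2 == v), v < p.2 :=
      dropWhile_gt v t ht hhd
    have hrun_v : ∀ p ∈ t.takeWhile (fun p => p.2 == v), p.2 = v := by
      intro p hp
      have := List.mem_takeWhile_imp hp
      simpa using this
    have hcv : (((k, v) :: t).map (·.2)).count v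
        = 1 + (t.takeWhile (fun p => p.2 == v)).length := by
      rw [hdecomp]
      simp only [List.map_cons, List.map_append, List.count_cons, List.count_append]
      have h1 : ((t.takeWhile (fun p => p.2 == v)).map (·.2)).count v
          = (t.takeWhile (fun p => p.2 == v)).length := by
        rw [List.count_eq_length.2 (by intro b hb; rcases List.mem_map.1 hb with ⟨q, hq, rfl⟩
                                       exact ((hrun_v q hq) ▸ rfl)), List.length_map]
      have h2 : ((t.dropWhile (fun p => p.2 == v)).map (·.2)).count v = 0 := by
        rw [List.count_eq_zero]
        intro hv
        rcases List.mem_map.1 hv with ⟨q, hq, hq2⟩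
        exact absurd hq2 (ne_of_gt (hrest_gt q hq))
      rw [h1, h2]; simp; omega
    have hcrest : ∀ p ∈ t.dropWhile (fun p => p.2 == v),
        (((k, v) :: t).map (·.2)).count p.2
          = ((t.dropWhile (fun p => p.2 == v)).map (·.2)).count p.2 := by
      intro p hp
      have hne : p.2 ≠ v := ne_of_gt (hrest_gt p hp)
      rw [hdecomp]
      simp only [List.map_cons, List.map_append, List.count_cons, List.count_append]
      have h1 : ((t.takeWhile (fun p => p.2 == v)).map (·.2)).count p.2 = 0 := by
        rw [List.count_eq_zero]
        intro hv
        rcases List.mem_map.1 hv with ⟨q, hq, hq2⟩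
        exact hne (hq2 ▸ (hrun_v q hq))
      rw [h1]; simp [Ne.symm hne]
    have hfrun : ∀ q ∈ t.takeWhile (fun p => p.2 == v),
        ((((k, v) :: t).map (·.2)).count q.2 == 1) = false := by
      intro q hq
      rw [hrun_v q hq, hcv]
      have hlen0 : (t.takeWhile (fun p => p.2 == v)).length ≠ 0 :=
        fun h0 => by rw [List.length_eq_zero_iff.1 h0] at hq; simp at hq
      simp only [beq_eq_false_iff_ne, ne_eq]
      omega
    -- abstract the filtering predicate so the list split below leaves it untouched
    obtain ⟨P, hP⟩ : ∃ P, P = (fun p : String × Int => ((((k, v) :: t).map (·.2)).count p.2 == 1)) :=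
      ⟨_, rfl⟩
    have hfilter_run : (t.takeWhile (fun p => p.2 == v)).filter P = [] :=
      List.filter_eq_nil_iff.2 (by
        intro q hq
        rw [hP]
        simp only [hfrun q hq]
        simp)
    have hfilter_rest : (t.dropWhile (fun p => p.2 == v)).filter P
        = (t.dropWhile (fun p => p.2 == v)).filter
            (fun p => ((t.dropWhile (fun p => p.2 == v)).map (·.2)).count p.2 == 1) := by
      rw [hP]
      exact List.filter_congr (by intro p hp; rw [hcrest p hp])
    conv_rhs =>
      rw [← hP,
        show ((k, v) :: t) = ((k, v) :: t.takeWhile (fun p => p.2 == v)) ++ t.dropWhile (fun p => p.2 == v) from by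
          rw [List.cons_append, ← hdecomp]]
    rw [List.filter_append, List.filter_cons, hfilter_run, hfilter_rest]
    have hrunP : P (k, v) = false := by
      rw [hP]
      show ((((k, v) :: t).map (·.2)).count (k, v).2 == 1) = false
      rw [show ((k, v) : String × Int).2 = v from rfl, hcv]
      have hlen0 : (t.takeWhile (fun p => p.2 == v)).length ≠ 0 :=
        fun h0 => hrun (by rw [List.length_eq_zero_iff.1 h0]; rfl)
      simp only [beq_eq_false_iff_ne, ne_eq]
      omega
    rw [hrunP]
    rw [show pvScanRuns ((k, v) :: t)
          = pvScanRuns (t.dropWhile (fun p => p.2 == v)) from by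
        rw [pvScanRuns]; rw [if_neg hrun], ih hrest_pw]
    simp

-- ===== VERDICT (by name: the statement is the Claim_ definition above) =====
theorem uniqueValues2_spec : Claim_equal_uniqueValues2 := by
  intro aDict _
  show uniqueValues2 aDict = uniqueValues2_alt aDict
  rw [show uniqueValues2 aDict
        = PySem.List.sorted
            (((aDict.foldl
                (fun (w : PySem.Dict Int (List String)) p =>
                  if w.contains p.2 then w.insert p.2 (w.getD p.2 [] ++ [p.1])
                  else w.insert p.2 [p.1])
                PySem.Dict.empty).items.filter (fun q => q.2.length == 1)).map
                (fun q => PySem.List.pyGetD q.2 0 "")) (fun x => x) false from rfl,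
    show uniqueValues2_alt aDict
        = PySem.List.sorted (pvScanRuns (PySem.List.sorted aDict (fun p => p.2) false)) (fun x => x) false from rfl]
  rw [A_pre_sort]
  set s := PySem.List.sorted aDict (fun p => p.2) false with hs
  rw [scan_eq_filter s (PySem.List.sorted_pairwise aDict (fun p => p.2))]
  apply PySem.List.sorted_eq_sorted_of_perm _ _ _ (fun a b h => h)
  have hperm : s.Perm aDict := PySem.List.sorted_perm aDict (fun p => p.2) false
  have hcnt : ∀ v : Int, (aDict.map (·.2)).count v = (s.map (·.2)).count v :=
    fun v => ((hperm.map (·.2)).count_eq v).symm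
  rw [show (aDict.filter (fun p => (aDict.map (·.2)).count p.2 == 1))
        = (aDict.filter (fun p => (s.map (·.2)).count p.2 == 1)) from
      List.filter_congr (by intro p _; rw [hcnt p.2])]
  exact ((hperm.symm).filter _).map _
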